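-- pv_equiv track=rewrite | github.com/dongjangoon/CodeTest | programmers/kakao/2022_recruit/report.py | solution
-- ===== SOURCE A (Python) =====
-- from collections import defaultdict
--
-- def solution(id_list, report, k):
--     answer = []
--
--     # 중복 제거
--     report = list(set(report))
--
--     # 신고당한 횟수를 카운팅할 딕셔너리
--     counter = defaultdict(int)
--
--     # 신고 당한 사람을 키로 신고한 사람을 리스트로 저장할 딕셔너리
--     report_list = defaultdict(set)
--
--     for r in report:
--         reporter, reportee = r.split()
--
--         report_list[reporter].add(reportee)
--         counter[reportee] += 1
--
--     for i in id_list: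
--         result = 0
--         for j in report_list[i]:
--             if counter[j] >= k:
--                 result += 1
--         answer.append(result)
--
--     return answer
-- ===== SOURCE B (Python) =====
-- def solution(id_list, report, k):
--     dedup = [r.split() for r in set(report)]
--     reported = [w for v, w in dedup]
--     suspended = {u for u in reported if reported.count(u) >= k}
--     return [len({w for v, w in dedup if v == i and w in suspended})
--             for i in id_list]
-- ===== Notes on version B (the rewrite author's own statement) =====
-- stated objective: simpler
-- what changed: Drops both of A's defaultdict indexes entirely: B is dict-free, deriving a suspended set by list.count over the reportee list and answering each id with a direct set comprehension over the deduped pairs (query-time scan instead of precomputed indexes).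
import Mathlib
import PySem

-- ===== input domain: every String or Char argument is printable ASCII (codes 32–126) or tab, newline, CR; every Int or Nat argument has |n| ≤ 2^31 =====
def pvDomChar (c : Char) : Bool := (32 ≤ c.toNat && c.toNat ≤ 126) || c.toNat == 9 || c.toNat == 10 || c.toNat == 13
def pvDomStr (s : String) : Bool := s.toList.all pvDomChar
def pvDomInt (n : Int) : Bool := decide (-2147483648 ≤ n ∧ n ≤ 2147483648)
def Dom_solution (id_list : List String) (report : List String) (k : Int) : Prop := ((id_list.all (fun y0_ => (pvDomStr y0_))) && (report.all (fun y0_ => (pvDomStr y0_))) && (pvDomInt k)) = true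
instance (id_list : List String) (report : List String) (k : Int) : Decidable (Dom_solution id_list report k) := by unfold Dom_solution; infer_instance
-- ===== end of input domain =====

-- B is dict-free: a suspended set via list.count on the reportee list and a direct set
-- comprehension per id, instead of A's two defaultdict indexes (objective: simpler).

-- ===== PORT A =====

-- 'reporter, reportee = r.split()': the two whitespace-separated tokens; none = ValueError (excluded by Pre_)
def pvParse (r : String) : Option (String × String) :=
  match PySem.Str.split₀ r with
  | [a, b] => some (a, b)
  | _ => none

-- Note: A's defaultdict lookups 'report_list[i]' / 'counter[j]' insert default entries
-- (a mutation) but never change any value read afterwards; the port reads with getD.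
def solution (id_list : List String) (report : List String) (k : Int) : List Int :=
  let report := PySem.Set.ofList report
  let st := report.foldl
    (fun (st : PySem.Dict String (PySem.Set String) × PySem.Dict String Int) r =>
      match pvParse r with
      | some (reporter, reportee) =>
          (st.1.modify reporter PySem.Set.empty (fun s => PySem.Set.add s reportee),
           st.2.modify reportee 0 (fun c => c + 1))
      | none => st)
    (PySem.Dict.empty, PySem.Dict.empty)
  id_list.map (fun i =>
    (st.1.getD i PySem.Set.empty).foldl
      (fun result j => if st.2.getD j 0 ≥ k then result + 1 else result) 0)

-- ===== PORT B =====

-- dedup = [r.split() for r in set(report)]: under Pre_ every split has exactly two tokens,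
-- so the filterMap keeps every element (Python raises outside Pre_).
def solution_alt (id_list : List String) (report : List String) (k : Int) : List Int :=
  let dedup := (PySem.Set.ofList report).filterMap pvParse
  let reported := dedup.map (fun p => p.2)
  let suspended := PySem.Set.ofList (reported.filter (fun u => (reported.count u : Int) ≥ k))
  id_list.map (fun i =>
    ((PySem.Set.ofList
        ((dedup.filter (fun p => p.1 == i && suspended.contains p.2)).map (fun p => p.2))).length : Int))

-- ===== PRECONDITION & SPEC =====
-- Pre_ excludes report entries that do not split into exactly two tokens: there Python A
-- raises ValueError on the tuple unpacking 'reporter, reportee = r.split()'.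
def Pre_solution (id_list : List String) (report : List String) (k : Int) : Prop :=
  ∀ r ∈ report, (PySem.Str.split₀ r).length = 2
instance (id_list : List String) (report : List String) (k : Int) : Decidable (Pre_solution id_list report k) := by unfold Pre_solution; infer_instance

def pvWitness_solution : List String × List String × Int :=
  (["muzi", "frodo", "apeach"], ["muzi frodo", "apeach muzi", "muzi frodo"], 1)

def Spec_solution (id_list : List String) (report : List String) (k : Int) (out : List Int) : Prop := out = solution_alt id_list report k
instance (id_list : List String) (report : List String) (k : Int) (out : List Int) : Decidable (Spec_solution id_list report k out) := by unfold Spec_solution; infer_instance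

-- ===== CLAIM (what is proved, stated in full; the proofs are below) =====
def Claim_equal_solution : Prop := ∀ (id_list : List String) (report : List String) (k : Int), Dom_solution id_list report k → Pre_solution id_list report k → Spec_solution id_list report k (solution id_list report k)

-- ===== LEMMAS AND PROOFS =====

-- A's state-building loop splits into two independent folds over the parsed pairs.
theorem pv_foldA_eq (l : List String)
    (d1 : PySem.Dict String (PySem.Set String)) (d2 : PySem.Dict String Int) :
    l.foldl
      (fun (st : PySem.Dict String (PySem.Set String) × PySem.Dict String Int) r =>
        match pvParse r with
        | some (reporter, reportee) =>
            (st.1.modify reporter PySem.Set.empty (fun s => PySem.Set.add s reportee),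
             st.2.modify reportee 0 (fun c => c + 1))
        | none => st) (d1, d2)
    = ((l.filterMap pvParse).foldl
         (fun d p => d.modify p.1 PySem.Set.empty (fun s => PySem.Set.add s p.2)) d1,
       (l.filterMap pvParse).foldl (fun d p => d.modify p.2 0 (fun c => c + 1)) d2) := by
  induction l generalizing d1 d2 with
  | nil => rfl
  | cons r t ih =>
      rcases h : pvParse r with _ | ⟨a, b⟩ <;>
        simp only [List.foldl_cons, List.filterMap_cons, h] <;> exact ih _ _

-- A's reporter-keyed dict of reportee-sets, looked up at c.
theorem pv_getD_fold_addset (l : List (String × String))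
    (d : PySem.Dict String (PySem.Set String)) (c : String) :
    (l.foldl (fun d p => d.modify p.1 PySem.Set.empty (fun s => PySem.Set.add s p.2)) d).getD
        c PySem.Set.empty
    = ((l.filter (fun p => p.1 == c)).map (fun p => p.2)).foldl PySem.Set.add
        (d.getD c PySem.Set.empty) := by
  induction l generalizing d with
  | nil => rfl
  | cons p t ih =>
      rw [List.foldl_cons, ih, PySem.Dict.getD_modify, List.filter_cons]
      by_cases hc : p.1 = c
      · subst hc; simp
      · have hc' : ¬ (c = p.1) := fun h => hc h.symm
        simp [hc', beq_false_of_ne hc]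

-- first-occurrence dedup (Set.ofList, as a running fold of Set.add) commutes with filter.
theorem pv_filter_foldl_add {α : Type} [BEq α] [LawfulBEq α] (p : α → Bool) (l : List α)
    (s : PySem.Set α) :
    (l.foldl PySem.Set.add s).filter p = (l.filter p).foldl PySem.Set.add (s.filter p) := by
  induction l generalizing s with
  | nil => rfl
  | cons x t ih =>
      have key : (PySem.Set.add s x).filter p
          = if p x then PySem.Set.add (s.filter p) x else s.filter p := by
        by_cases hm : x ∈ s <;> by_cases hp : p x = true <;>
          simp [PySem.Set.add, PySem.Set.contains, List.mem_filter, hm, hp, List.filter_append]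
      rw [List.foldl_cons, ih, key, List.filter_cons]
      by_cases hp : p x = true
      · simp [hp]
      · simp [hp]

-- ===== VERDICT (by name: the statement is the Claim_ definition above) =====
theorem solution_spec : Claim_equal_solution := by
  intro id_list report k _ _
  unfold Spec_solution
  simp only [solution, solution_alt]
  rw [pv_foldA_eq]
  simp only
  set L := ((PySem.Set.ofList report).filterMap pvParse) with hLdef
  apply List.map_congr_left
  intro i _
  -- A's counter dict equals counting in the reportee list
  have hcnt : ∀ j,
      (L.foldl (fun d p => d.modify p.2 0 (fun c => c + 1))
          (PySem.Dict.empty : PySem.Dict String Int)).getD j 0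
        = (((L.map (fun p => p.2)).count j : Nat) : Int) := by
    intro j
    rw [show L.foldl (fun d p => d.modify p.2 0 (fun c => c + 1))
            (PySem.Dict.empty : PySem.Dict String Int)
          = (L.map (fun p => p.2)).foldl (fun d x => d.modify x 0 (fun c => c + 1))
            (PySem.Dict.empty : PySem.Dict String Int)
        from by rw [List.foldl_map]]
    rw [PySem.Dict.getD_foldl_modify_add_one]
    simp
  -- A's per-id value: a countP over the deduped reportee list of i
  rw [pv_getD_fold_addset]
  rw [show (PySem.Dict.empty : PySem.Dict String (PySem.Set String)).getD i PySem.Set.empty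
        = ([] : List String) from rfl]
  rw [show ∀ (M : List String), M.foldl PySem.Set.add [] = PySem.Set.ofList M from
        fun M => (PySem.Set.ofList_eq_foldl M).symm]
  have hcount_shape :
      (fun (result : Int) j =>
          if (L.foldl (fun d p => d.modify p.2 0 (fun c => c + 1))
              (PySem.Dict.empty : PySem.Dict String Int)).getD j 0 ≥ k
          then result + 1 else result)
        = (fun (result : Int) j =>
          if (fun j => decide (k ≤ (((L.map (fun p => p.2)).count j : Nat) : Int))) j = true
          then result + 1 else result) := by
    funext r j
    by_cases h : k ≤ (((L.map (fun p => p.2)).count j : Nat) : Int) <;> simp [hcnt j, h]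
  rw [hcount_shape, PySem.List.foldl_count_if, zero_add]
  -- B's per-id value
  set cond : String → Bool :=
    fun j => decide (k ≤ (((L.map (fun p => p.2)).count j : Nat) : Int)) with hconddef
  -- suspended membership agrees with cond on every parsed reportee
  have hsusp : ∀ p ∈ L,
      (PySem.Set.ofList ((L.map (fun p => p.2)).filter
          (fun u => ((L.map (fun p => p.2)).count u : Int) ≥ k))).contains p.2 = cond p.2 := by
    intro p hp
    have hmem : p.2 ∈ L.map (fun p => p.2) := List.mem_map_of_mem hp
    simp only [PySem.Set.contains, List.contains_eq_mem, PySem.Set.mem_ofList,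
      List.mem_filter, hconddef, ge_iff_le]
    by_cases h : k ≤ (((L.map (fun p => p.2)).count p.2 : Nat) : Int) <;> simp [h, hmem]
  have hfc : L.filter (fun p => p.1 == i &&
        (PySem.Set.ofList ((L.map (fun p => p.2)).filter
          (fun u => ((L.map (fun p => p.2)).count u : Int) ≥ k))).contains p.2)
      = L.filter (fun p => p.1 == i && cond p.2) :=
    List.filter_congr (fun p hp => by rw [hsusp p hp])
  rw [hfc]
  -- split the conjunction filter and push map through
  have hsplit : L.filter (fun p => p.1 == i && cond p.2)
      = (L.filter (fun p => p.1 == i)).filter (fun p => cond p.2) := by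
    rw [List.filter_filter]
    exact List.filter_congr (fun p _ => by rw [Bool.and_comm])
  have hmapfilter : ∀ (l : List (String × String)),
      (l.filter (fun p => cond p.2)).map (fun p => p.2)
        = (l.map (fun p => p.2)).filter cond := by
    intro l
    induction l with
    | nil => rfl
    | cons p t ih =>
        by_cases h : cond p.2 = true <;> simp [h, ih]
  rw [hsplit, hmapfilter]
  -- dedup commutes with the filter, and length-of-filter is countP
  rw [show ∀ (M : List String), PySem.Set.ofList (M.filter cond)
        = (PySem.Set.ofList M).filter cond from fun M => by
      rw [PySem.Set.ofList_eq_foldl M, pv_filter_foldl_add, PySem.Set.ofList_eq_foldl]; rfl]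
  rw [List.countP_eq_length_filter]
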